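-- pv_equiv track=rewrite | github.com/mprokhorov/bsu | computer-security-of-distributed-systems/lab3/task2.py | generate_elliptic_group_elements
-- ===== SOURCE A (Python) =====
-- def generate_elliptic_group_elements(a, b, M):
--     elements = []
--
--     for x in range(M):
--         # Вычисление y по уравнению эллиптической кривой: y^2 = x^3 + ax + b
--         y_squared = (x**3 + a*x + b) % M
--         y = None
--
--         # Поиск корней квадратного уравнения
--         for candidate_y in range(M):
--             if (candidate_y**2) % M == y_squared:
--                 y = candidate_y
--                 break
--
--         # Если найден корень, добавить точку в группу
--         if y is not None:
--             elements.append((x, y))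
--
--     return elements
-- ===== SOURCE B (Python) =====
-- def generate_elliptic_group_elements(a, b, M):
--     # One pass to map each quadratic residue to its smallest root, then one lookup per x.
--     smallest_root = {}
--     for y in range(M):
--         r = (y ** 2) % M
--         if r not in smallest_root:
--             smallest_root[r] = y
--     elements = []
--     for x in range(M):
--         y_squared = (x ** 3 + a * x + b) % M
--         if y_squared in smallest_root:
--             elements.append((x, smallest_root[y_squared]))
--     return elements
-- ===== Notes on version B (the rewrite author's own statement) =====
-- stated objective: faster
-- what changed: Replaces the inner O(M) scan for a square root of each x's residue by a dict residue->smallest root built in one pass, so each x is a single lookup.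
import Mathlib
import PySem

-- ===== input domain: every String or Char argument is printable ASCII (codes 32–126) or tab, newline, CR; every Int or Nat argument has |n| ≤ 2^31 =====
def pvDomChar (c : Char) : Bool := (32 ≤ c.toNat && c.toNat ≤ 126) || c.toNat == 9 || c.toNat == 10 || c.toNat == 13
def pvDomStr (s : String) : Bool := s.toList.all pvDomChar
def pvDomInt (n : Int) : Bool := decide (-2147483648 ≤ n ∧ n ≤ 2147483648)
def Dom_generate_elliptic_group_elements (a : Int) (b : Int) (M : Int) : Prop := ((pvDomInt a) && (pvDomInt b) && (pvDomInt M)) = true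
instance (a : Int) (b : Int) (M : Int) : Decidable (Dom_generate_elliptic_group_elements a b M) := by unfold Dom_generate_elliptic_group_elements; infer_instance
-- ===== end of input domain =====

-- B replaces A's inner O(M) root search per x by a dict residue -> smallest root built once (asymptotically faster).

-- ===== PORT A =====
-- inner loop 'for candidate_y in range(M): if candidate_y**2 % M == y_squared: y = candidate_y; break' = first match
def generate_elliptic_group_elements (a : Int) (b : Int) (M : Int) : List (List Int) :=
  (PySem.List.pyRange 0 M 1).foldl
    (fun elements x =>
      let y_squared := PySem.Int.mod (x ^ 3 + a * x + b) M
      let y := (PySem.List.pyRange 0 M 1).find? (fun c => PySem.Int.mod (c ^ 2) M == y_squared)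
      match y with
      | some y => elements ++ [[x, y]]
      | none => elements)
    []

-- ===== PORT B =====
def generate_elliptic_group_elements_alt (a : Int) (b : Int) (M : Int) : List (List Int) :=
  let smallest_root : PySem.Dict Int Int :=
    (PySem.List.pyRange 0 M 1).foldl
      (fun d y =>
        let r := PySem.Int.mod (y ^ 2) M
        if d.contains r then d else d.insert r y)
      PySem.Dict.empty
  (PySem.List.pyRange 0 M 1).foldl
    (fun elements x =>
      let y_squared := PySem.Int.mod (x ^ 3 + a * x + b) M
      match smallest_root.get? y_squared with
      | some y => elements ++ [[x, y]]
      | none => elements)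
    []

-- ===== PRECONDITION & SPEC =====
def Spec_generate_elliptic_group_elements (a : Int) (b : Int) (M : Int) (out : List (List Int)) : Prop := out = generate_elliptic_group_elements_alt a b M
instance (a : Int) (b : Int) (M : Int) (out : List (List Int)) : Decidable (Spec_generate_elliptic_group_elements a b M out) := by unfold Spec_generate_elliptic_group_elements; infer_instance

-- ===== CLAIM (what is proved, stated in full; the proofs are below) =====
def Claim_equal_generate_elliptic_group_elements : Prop := ∀ (a : Int) (b : Int) (M : Int), Dom_generate_elliptic_group_elements a b M → Spec_generate_elliptic_group_elements a b M (generate_elliptic_group_elements a b M)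

-- ===== LEMMAS AND PROOFS =====

-- The dict built by B's first loop answers every lookup as A's linear search does:
-- entries already in d take priority (the loop never overwrites), then the first matching y of L.
theorem pv_dict_find (M : Int) (L : List Int) (d : PySem.Dict Int Int) (k : Int) :
    (L.foldl (fun d y => let r := PySem.Int.mod (y ^ 2) M;
                         if d.contains r then d else d.insert r y) d).get? k
      = (d.get? k).or (L.find? (fun c => PySem.Int.mod (c ^ 2) M == k)) := by
  induction L generalizing d with
  | nil => simp
  | cons y L ih =>
    simp only [List.foldl_cons, List.find?_cons, ih]
    by_cases hk : PySem.Int.mod (y ^ 2) M = k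
    · subst hk
      simp only [beq_self_eq_true]
      by_cases hc : d.contains (PySem.Int.mod (y ^ 2) M)
      · rw [if_pos hc]
        have hs : (d.get? (PySem.Int.mod (y ^ 2) M)).isSome := by
          rw [← PySem.Dict.contains_eq_isSome_get?]; exact hc
        obtain ⟨v, hv⟩ := Option.isSome_iff_exists.mp hs
        simp [hv]
      · rw [if_neg hc, PySem.Dict.get?_insert_self]
        have hn : d.get? (PySem.Int.mod (y ^ 2) M) = none := by
          rcases Option.eq_none_or_eq_some (d.get? (PySem.Int.mod (y ^ 2) M)) with h | ⟨v, hv⟩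
          · exact h
          · exact absurd (by rw [PySem.Dict.contains_eq_isSome_get?, hv]; rfl) hc
        simp [hn]
    · have hb : (PySem.Int.mod (y ^ 2) M == k) = false := by simp [hk]
      rw [hb]
      by_cases hc : d.contains (PySem.Int.mod (y ^ 2) M)
      · rw [if_pos hc]
      · rw [if_neg hc, PySem.Dict.get?_insert_of_ne _ _ (fun h => hk h.symm)]

-- ===== VERDICT (by name: the statement is the Claim_ definition above) =====
theorem generate_elliptic_group_elements_spec : Claim_equal_generate_elliptic_group_elements := by
  intro a b M _
  unfold Spec_generate_elliptic_group_elements generate_elliptic_group_elements generate_elliptic_group_elements_alt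
  congr 1
  funext elements x
  simp only [pv_dict_find, PySem.Dict.get?_empty, Option.none_or]
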